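-- pv_equiv track=rewrite | github.com/tesselslate/sandbox | 2019/04.py | proc2
-- ===== SOURCE A (Python) =====
-- def proc2(i):
--     s = str(i)
--     m = 0
--     b = False
--
--     ch, ct = None, 0
--     for j in range(6):
--         if s[j] == ch:
--             ct += 1
--         else:
--             if ct == 2:
--                 b = True
--             ch, ct = s[j], 1
--         if int(s[j]) < m:
--             return False
--         m = int(s[j])
--     return b or ct == 2
-- ===== SOURCE B (Python) =====
-- # B: splits A's single interleaved pass into (1) a monotonicity check over the
-- # first six digits, then (2) a separate run-length scan for a run of exactly 2.
-- def _has_run2(s):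
--     if not s:
--         return False
--     n = 1
--     while n < len(s) and s[n] == s[0]:
--         n += 1
--     return n == 2 or _has_run2(s[n:])
--
-- def proc2(i):
--     s = str(i)[:6]
--     ds = [int(c) for c in s]
--     if any(x > y for x, y in zip(ds, ds[1:])):
--         return False
--     return _has_run2(s)
-- ===== Notes on version B (the rewrite author's own statement) =====
-- stated objective: simpler
-- what changed: A's single loop over range(6) interleaves the monotonicity check with run-length bookkeeping (ch/ct/b state); B first checks that the first six digits are non-decreasing with one pairwise zip pass, then separately scans maximal runs of str(i)[:6] for a run of length exactly 2.
import Mathlib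
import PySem

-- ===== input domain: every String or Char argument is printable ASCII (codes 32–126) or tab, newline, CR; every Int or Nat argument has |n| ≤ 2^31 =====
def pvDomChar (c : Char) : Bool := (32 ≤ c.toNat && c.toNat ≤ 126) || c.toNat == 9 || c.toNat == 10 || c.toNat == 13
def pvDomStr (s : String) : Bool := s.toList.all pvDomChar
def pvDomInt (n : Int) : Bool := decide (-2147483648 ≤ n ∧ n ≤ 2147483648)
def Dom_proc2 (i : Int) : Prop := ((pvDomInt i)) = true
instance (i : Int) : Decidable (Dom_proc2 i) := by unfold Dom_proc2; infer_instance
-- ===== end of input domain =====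

-- B splits A's single interleaved pass into a monotonicity check over the first six digits
-- followed by a separate run-length scan for a maximal run of length exactly 2 (objective: simpler).

-- int(c) for a one-character string, via Python-exact int(); the getD default is never
-- reached on inputs where the Python returns (there int() is only applied to digit chars).
def pvDig (c : Char) : Int := (PySem.Int.ofChars? [c]).getD 0

-- ===== PORT A =====
def proc2Go (s : List Char) (j : Nat) (m : Int) (b : Bool) (ch : Option Char) (ct : Int) : Bool :=
  if j < 6 then
    match PySem.List.pyGet? s (j : Int) with
    | none => false        -- IndexError; outside Pre_proc2
    | some c =>
      -- `if s[j] == ch: ct += 1 else: (if ct == 2: b = True); ch, ct = s[j], 1`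
      let p : Bool × Option Char × Int :=
        if some c == ch then (b, ch, ct + 1)
        else (if ct == 2 then true else b, some c, 1)
      if pvDig c < m then false
      else proc2Go s (j + 1) (pvDig c) p.1 p.2.1 p.2.2
  else b || (ct == 2)
termination_by 6 - j

def proc2 (i : Int) : Bool :=
  proc2Go (PySem.Int.toStr i).toList 0 0 false none 0

-- ===== PORT B =====
-- _has_run2(s): length of the maximal leading run; exactly 2, or recurse on the remainder.
-- The fuel argument (initially s.length, an upper bound for the whole recursion) is only a
-- totality device; it never runs out.
def hasRun2Go : Nat → List Char → Bool
  | _, [] => false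
  | 0, _ :: _ => false          -- fuel exhausted: unreachable
  | fuel + 1, c :: rest =>
      ((1 + (rest.takeWhile (fun x => x == c)).length) == 2)
      || hasRun2Go fuel (rest.dropWhile (fun x => x == c))

def hasRun2 (s : List Char) : Bool := hasRun2Go s.length s

def proc2_alt (i : Int) : Bool :=
  let s := PySem.List.slice (PySem.Int.toStr i).toList none (some 6)   -- str(i)[:6]
  let ds := s.map pvDig
  if (ds.zip ds.tail).any (fun p => decide (p.2 < p.1)) then false
  else hasRun2 s

-- ===== PRECONDITION & SPEC =====
-- Exactly the inputs on which A returns: either i has at least six digits (and no '-' sign),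
-- or i is non-negative and its decimal digits (most significant first) strictly decrease
-- somewhere, in which case A's loop short-circuits to False before indexing past the end of
-- str(i). On all other inputs A raises (IndexError on short non-decreasing inputs,
-- ValueError at int('-') for negative inputs).
def Pre_proc2 (i : Int) : Prop :=
  100000 ≤ i ∨ (0 ≤ i ∧ ¬ ((Nat.digits 10 i.toNat).reverse).IsChain (· ≤ ·))
instance (i : Int) : Decidable (Pre_proc2 i) := by unfold Pre_proc2; infer_instance

def pvWitness_proc2 : Int := 123455

def Spec_proc2 (i : Int) (out : Bool) : Prop := out = proc2_alt i
instance (i : Int) (out : Bool) : Decidable (Spec_proc2 i out) := by unfold Spec_proc2; infer_instance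

-- ===== CLAIM (what is proved, stated in full; the proofs are below) =====
def Claim_equal_proc2 : Prop := ∀ (i : Int), Dom_proc2 i → Pre_proc2 i → Spec_proc2 i (proc2 i)

-- ===== LEMMAS AND PROOFS =====

-- hasRun2Go does not depend on the fuel once the fuel covers the list length.
theorem hasRun2Go_irrel (f1 : Nat) : ∀ (f2 : Nat) (s : List Char),
    s.length ≤ f1 → s.length ≤ f2 → hasRun2Go f1 s = hasRun2Go f2 s := by
  induction f1 with
  | zero =>
    intro f2 s h1 _
    cases s with
    | nil => cases f2 <;> rfl
    | cons c r => simp at h1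
  | succ f ih =>
    intro f2 s h1 h2
    cases s with
    | nil => cases f2 <;> rfl
    | cons c r =>
      cases f2 with
      | zero => simp at h2
      | succ g =>
        simp only [hasRun2Go]
        congr 1
        exact ih g _ (le_trans (List.length_dropWhile_le _ _) (by simpa using h1))
              (le_trans (List.length_dropWhile_le _ _) (by simpa using h2))

theorem hasRun2_cons (c : Char) (rest : List Char) :
    hasRun2 (c :: rest) =
      (((1 + (rest.takeWhile (fun x => x == c)).length) == 2)
        || hasRun2 (rest.dropWhile (fun x => x == c))) := by
  show hasRun2Go (rest.length + 1) (c :: rest) = _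
  simp only [hasRun2Go]
  congr 1
  exact hasRun2Go_irrel _ _ _ (List.length_dropWhile_le _ _) le_rfl

-- A's loop, re-read as a fuel loop over the list of the first (6 - j) characters.
def loopK : List Char → Nat → Int → Bool → Option Char → Int → Bool
  | _, 0, _, b, _, ct => b || (ct == 2)
  | [], _ + 1, _, _, _, _ => false
  | c :: r, k + 1, m, b, ch, ct =>
    let p : Bool × Option Char × Int :=
      if some c == ch then (b, ch, ct + 1)
      else (if ct == 2 then true else b, some c, 1)
    if pvDig c < m then false else loopK r k (pvDig c) p.1 p.2.1 p.2.2

-- A's run-length state machine alone (no monotonicity check).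
def runEval : List Char → Bool → Option Char → Int → Bool
  | [], b, _, ct => b || (ct == 2)
  | c :: r, b, ch, ct =>
    if some c == ch then runEval r b ch (ct + 1)
    else runEval r (if ct == 2 then true else b) (some c) 1

-- A's monotonicity check alone: a digit below m, or a strict decrease later on.
def decFrom : Int → List Char → Bool
  | _, [] => false
  | m, c :: r => (decide (pvDig c < m)) || decFrom (pvDig c) r

-- B's adjacent-pair decrease test.
def decAdj (t : List Char) : Bool :=
  ((t.map pvDig).zip (t.map pvDig).tail).any (fun p => decide (p.2 < p.1))

theorem bridge (s : List Char) (j : Nat) (m : Int) (b : Bool) (ch : Option Char) (ct : Int) :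
    proc2Go s j m b ch ct = loopK ((s.drop j).take (6 - j)) (6 - j) m b ch ct := by
  suffices H : ∀ (k j : Nat) (m : Int) (b : Bool) (ch : Option Char) (ct : Int), 6 - j = k →
      proc2Go s j m b ch ct = loopK ((s.drop j).take (6 - j)) (6 - j) m b ch ct from
    H (6 - j) j m b ch ct rfl
  intro k
  induction k with
  | zero =>
    intro j m b ch ct hk
    have hj : ¬ j < 6 := by omega
    rw [proc2Go, hk]
    simp [hj, loopK]
  | succ k ih =>
    intro j m b ch ct hk
    have hj : j < 6 := by omega
    rw [proc2Go, hk]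
    simp only [if_pos hj]
    cases hget : PySem.List.pyGet? s (j : Int) with
    | none =>
      have hn : s[j]? = none := by rw [← PySem.List.pyGet?_natCast]; exact hget
      have hlen : s.length ≤ j := List.getElem?_eq_none_iff.mp hn
      rw [List.drop_eq_nil_of_le hlen]
      simp [loopK]
    | some c =>
      have hsj : s[j]? = some c := by rw [← PySem.List.pyGet?_natCast]; exact hget
      obtain ⟨hj', hc⟩ := List.getElem?_eq_some_iff.mp hsj
      rw [List.drop_eq_getElem_cons hj', hc, List.take_succ_cons]
      simp only [loopK]
      by_cases hm : pvDig c < m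
      · simp [hm]
      · simp only [if_neg hm]
        have hk' : 6 - (j + 1) = k := by omega
        rw [ih (j + 1) _ _ _ _ hk', hk']

theorem loopK_full (t : List Char) : ∀ (m : Int) (b : Bool) (ch : Option Char) (ct : Int),
    loopK t t.length m b ch ct = ((!(decFrom m t)) && runEval t b ch ct) := by
  induction t with
  | nil => intro m b ch ct; simp [loopK, decFrom, runEval]
  | cons c r ih =>
    intro m b ch ct
    simp only [List.length_cons, loopK, decFrom, runEval]
    by_cases hm : pvDig c < m
    · simp [hm]
    · simp only [hm, decide_false, Bool.false_or]
      by_cases hch : (some c == ch) = true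
      · simp only [if_pos hch]; exact ih _ _ _ _
      · simp only [if_neg hch]; exact ih _ _ _ _

theorem loopK_short (t : List Char) : ∀ (k : Nat) (m : Int) (b : Bool) (ch : Option Char)
    (ct : Int), t.length ≤ k → decFrom m t = true → loopK t k m b ch ct = false := by
  induction t with
  | nil => intro k m b ch ct _ hd; simp [decFrom] at hd
  | cons c r ih =>
    intro k m b ch ct hk hd
    cases k with
    | zero => simp at hk
    | succ k' =>
      simp only [loopK]
      by_cases hm : pvDig c < m
      · simp [hm]
      · simp only [if_neg hm]
        simp only [decFrom, hm, decide_false, Bool.false_or] at hd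
        exact ih _ _ _ _ _ (by simpa using hk) hd

theorem decAdj_cons (c : Char) (r : List Char) :
    decAdj (c :: r) =
      ((match r with | [] => false | c' :: _ => decide (pvDig c' < pvDig c)) || decAdj r) := by
  cases r with
  | nil => simp [decAdj]
  | cons c' r' => simp [decAdj]

theorem decAdj_cons2 (c c' : Char) (r : List Char) :
    decAdj (c :: c' :: r) = (decide (pvDig c' < pvDig c) || decAdj (c' :: r)) := by
  simp [decAdj]

theorem decFrom_eq (t : List Char) : ∀ (m : Int),
    decFrom m t =
      ((match t with | [] => false | c :: _ => decide (pvDig c < m)) || decAdj t) := by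
  induction t with
  | nil => intro m; simp [decFrom, decAdj]
  | cons c r ih =>
    intro m
    simp only [decFrom]
    rw [ih (pvDig c), decAdj_cons]

theorem beq_cast_succ (ct : Int) (L : Nat) :
    ((ct + 1 + (L : Int)) == 2) = ((ct + ((L + 1 : Nat) : Int)) == 2) := by
  have h : ct + 1 + (L : Int) = ct + ((L + 1 : Nat) : Int) := by push_cast; ring
  rw [h]

theorem beq_cast_one (L : Nat) : ((1 + (L : Int)) == 2) = (((1 + L : Nat)) == 2) := by
  rw [Bool.eq_iff_iff]
  simp only [beq_iff_eq]
  constructor <;> intro h <;> omega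

theorem run_state (t : List Char) : ∀ (b : Bool) (c : Char) (ct : Int),
    runEval t b (some c) ct =
      (b || ((ct + ((t.takeWhile (fun x => x == c)).length : Int)) == 2)
         || hasRun2 (t.dropWhile (fun x => x == c))) := by
  induction t with
  | nil => intro b c ct; simp [runEval, hasRun2, hasRun2Go]
  | cons x r ih =>
    intro b c ct
    simp only [runEval]
    by_cases hx : (x == c) = true
    · have hsx : (some x == some c) = true := by simpa using hx
      rw [if_pos hsx, ih]
      simp only [List.takeWhile_cons, List.dropWhile_cons, hx, if_pos]
      rw [List.length_cons, ← beq_cast_succ]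
    · have hsx : (some x == some c) = false := by simpa using hx
      rw [Bool.not_eq_true] at hx
      rw [if_neg (by simp [hsx]), ih]
      have htw : List.takeWhile (fun y => y == c) (x :: r) = [] := by
        simp [hx]
      have hdw : List.dropWhile (fun y => y == c) (x :: r) = x :: r := by
        simp [hx]
      rw [htw, hdw, hasRun2_cons, beq_cast_one]
      have hb : (if (ct == 2) = true then true else b) = (b || (ct == 2)) := by
        cases h : (ct == 2) <;> simp [h]
      rw [hb]
      simp only [List.length_nil, Nat.cast_zero, add_zero]
      cases b <;> cases h2 : (ct == 2) <;> simp [Bool.or_assoc]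

theorem run_init (t : List Char) : runEval t false none 0 = hasRun2 t := by
  cases t with
  | nil => simp [runEval, hasRun2, hasRun2Go]
  | cons c r =>
    simp only [runEval, show ((some c == (none : Option Char)) = false) from rfl, if_neg,
      Bool.false_eq_true, not_false_eq_true]
    rw [show (if ((0 : Int) == 2) = true then true else false) = false from rfl, run_state]
    rw [hasRun2_cons, beq_cast_one]
    simp

theorem pvDig_digitChar (d : Nat) (hd : d < 10) : pvDig (Nat.digitChar d) = (d : Int) := by
  interval_cases d <;> decide

theorem toDigitsCore_eq (fuel : Nat) : ∀ (n : Nat) (ds : List Char), 0 < n → n < 10 ^ fuel →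
    Nat.toDigitsCore 10 fuel n ds = (Nat.digits 10 n).reverse.map Nat.digitChar ++ ds := by
  induction fuel with
  | zero => intro n ds h0 hf; simp at hf; omega
  | succ fuel ih =>
    intro n ds h0 hf
    rw [Nat.toDigitsCore]
    by_cases hdiv : n / 10 = 0
    · have hn10 : n < 10 := by omega
      rw [if_pos hdiv, Nat.digits_def' (by norm_num) h0, hdiv, Nat.digits_zero,
        Nat.mod_eq_of_lt hn10]
      simp
    · rw [if_neg hdiv]
      have h0' : 0 < n / 10 := Nat.pos_of_ne_zero hdiv
      have hf' : n / 10 < 10 ^ fuel := by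
        rw [Nat.div_lt_iff_lt_mul (by norm_num)]
        calc n < 10 ^ (fuel + 1) := hf
          _ = 10 ^ fuel * 10 := by ring
      rw [ih (n / 10) _ h0' hf', Nat.digits_def' (by norm_num) h0]
      simp

theorem toChars_eq (n : Nat) (h0 : 0 < n) :
    PySem.Int.toChars (n : Int) = (Nat.digits 10 n).reverse.map Nat.digitChar := by
  have hneg : ¬ ((n : Int) < 0) := by omega
  rw [PySem.Int.toChars]
  rw [if_neg hneg, Int.toNat_natCast, Nat.toDigits]
  rw [toDigitsCore_eq (n + 1) n [] h0
    (lt_of_lt_of_le (Nat.lt_pow_self (by norm_num)) (Nat.pow_le_pow_right (by norm_num) (Nat.le_succ n)))]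
  simp

theorem decAdj_map (l : List Nat) (hl : ∀ d ∈ l, d < 10) :
    decAdj (l.map Nat.digitChar) = !decide (l.IsChain (· ≤ ·)) := by
  induction l with
  | nil => simp [decAdj]
  | cons d l ih =>
    cases l with
    | nil => simp [decAdj]
    | cons d' l' =>
      have hd : d < 10 := hl d (by simp)
      have hd' : d' < 10 := hl d' (by simp)
      rw [List.map_cons, List.map_cons, decAdj_cons2, ← List.map_cons,
        ih (fun x hx => hl x (List.mem_cons_of_mem d hx)),
        pvDig_digitChar d hd, pvDig_digitChar d' hd',
        decide_eq_decide.mpr List.isChain_cons_cons, Bool.decide_and, Bool.not_and]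
      congr 1
      rw [show (!decide (d ≤ d')) = decide (¬ (d ≤ d')) from (decide_not).symm,
        decide_eq_decide]
      constructor <;> intro h <;> omega

theorem altB (i : Int) :
    proc2_alt i =
      (if decAdj ((PySem.Int.toChars i).take 6) then false
       else hasRun2 ((PySem.Int.toChars i).take 6)) := by
  have h6 : PySem.List.slice (PySem.Int.toChars i) none (some 6) =
      (PySem.Int.toChars i).take 6 := by
    simpa using PySem.List.slice_to_natCast (PySem.Int.toChars i) 6
  simp only [proc2_alt, PySem.Int.toList_toStr, h6, decAdj]
  rfl

-- ===== VERDICT (by name: the statement is the Claim_ definition above) =====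
theorem proc2_spec : Claim_equal_proc2 := by
  intro i _ hpre
  unfold Spec_proc2
  rw [altB]
  show proc2Go ((PySem.Int.toStr i).toList) 0 0 false none 0 = _
  rw [bridge]
  simp only [List.drop_zero, Nat.sub_zero, PySem.Int.toList_toStr]
  have h0 : 0 ≤ i := by rcases hpre with h | ⟨h, _⟩ <;> omega
  obtain ⟨n, rfl⟩ : ∃ n : Nat, i = (n : Int) := ⟨i.toNat, by omega⟩
  unfold Pre_proc2 at hpre
  rw [Int.toNat_natCast] at hpre
  by_cases hbig : 100000 ≤ n
  · -- at least six digits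
    have hn0 : n ≠ 0 := by omega
    have hs : PySem.Int.toChars (n : Int) =
        ((Nat.digits 10 n).reverse).map Nat.digitChar :=
      toChars_eq n (Nat.pos_of_ne_zero hn0)
    have hlog : 5 ≤ Nat.log 10 n := by
      rw [Nat.le_log_iff_pow_le (b := 10) (by norm_num) hn0]
      norm_num
      omega
    have hlen : 6 ≤ (PySem.Int.toChars (n : Int)).length := by
      rw [hs, List.length_map, List.length_reverse, Nat.length_digits 10 n (by norm_num) hn0]
      omega
    set t := (PySem.Int.toChars (n : Int)).take 6 with ht
    have hlt : t.length = 6 := by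
      rw [ht, List.length_take]; omega
    rw [← hlt, loopK_full, run_init, decFrom_eq]
    cases hte : t with
    | nil => rw [hte] at hlt; simp at hlt
    | cons c tr =>
      have hct : c ∈ t := by rw [hte]; simp
      have hcs : c ∈ (PySem.Int.toChars (n : Int)) := List.take_subset 6 _ hct
      rw [hs] at hcs
      obtain ⟨d, hdm, hdc⟩ := List.mem_map.mp hcs
      have hd10 : d < 10 := Nat.digits_lt_base (by norm_num) (List.mem_reverse.mp hdm)
      have hc0 : ¬ (pvDig c < 0) := by
        rw [← hdc, pvDig_digitChar d hd10]; omega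
      simp only [hc0, decide_false, Bool.false_or]
      rw [← hte]
      cases hA : decAdj t <;> simp [hA]
  · -- short input with a strict digit decrease
    rcases hpre with h | ⟨_, hnc⟩
    · omega
    have hn0 : n ≠ 0 := by
      intro h
      exact hnc (by simp [h])
    have hs : PySem.Int.toChars (n : Int) =
        ((Nat.digits 10 n).reverse).map Nat.digitChar :=
      toChars_eq n (Nat.pos_of_ne_zero hn0)
    have hlog : Nat.log 10 n < 5 := by
      by_contra hcon
      have h5 := (Nat.le_log_iff_pow_le (b := 10) (by norm_num) hn0).mp (show 5 ≤ Nat.log 10 n by omega)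
      norm_num at h5
      omega
    have hlen : (PySem.Int.toChars (n : Int)).length ≤ 6 := by
      rw [hs, List.length_map, List.length_reverse, Nat.length_digits 10 n (by norm_num) hn0]
      omega
    rw [List.take_of_length_le hlen]
    have hdec : decAdj (PySem.Int.toChars (n : Int)) = true := by
      rw [hs, decAdj_map _ (fun d hd => Nat.digits_lt_base (by norm_num) (List.mem_reverse.mp hd))]
      simp [hnc]
    have hfrom : decFrom 0 (PySem.Int.toChars (n : Int)) = true := by
      rw [decFrom_eq, hdec, Bool.or_true]
    rw [loopK_short _ 6 0 false none 0 hlen hfrom, hdec]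
    rfl
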